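-- pv_equiv track=rewrite | github.com/lizeyan/Zotero-meta-update | work/utils.py | are_title_almost_equal
-- ===== SOURCE A (Python) =====
-- def are_title_almost_equal(title_a: str, title_b: str) -> bool:
--     def is_valid_char(c):
--         nums = {
--             chr(_) for _ in range(ord('0'), ord('9') + 1)
--         }
--         alphabets = {
--             chr(_) for _ in range(ord('a'), ord('z') + 1)
--         }
--         return c in nums or c in alphabets
--
--     return tuple(filter(is_valid_char, title_a.lower())) == tuple(filter(is_valid_char, title_b.lower()))
-- ===== SOURCE B (Python) =====
-- def are_title_almost_equal(title_a: str, title_b: str) -> bool: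
--     def is_valid_char(c):
--         return '0' <= c <= '9' or 'a' <= c <= 'z'
--
--     a = title_a.lower()
--     b = title_b.lower()
--     i = 0
--     j = 0
--     while True:
--         while i < len(a) and not is_valid_char(a[i]):
--             i += 1
--         while j < len(b) and not is_valid_char(b[j]):
--             j += 1
--         if i >= len(a) or j >= len(b):
--             return i >= len(a) and j >= len(b)
--         if a[i] != b[j]:
--             return False
--         i += 1
--         j += 1
-- ===== Notes on version B (the rewrite author's own statement) =====
-- stated objective: faster
-- what changed: Replaced building and comparing two filtered tuples (with the digit/letter sets reconstructed for every character) with a single two-pointer scan over both lowercased strings using constant-time range tests, skipping invalid characters in place and exiting early on the first mismatch.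
import Mathlib
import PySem

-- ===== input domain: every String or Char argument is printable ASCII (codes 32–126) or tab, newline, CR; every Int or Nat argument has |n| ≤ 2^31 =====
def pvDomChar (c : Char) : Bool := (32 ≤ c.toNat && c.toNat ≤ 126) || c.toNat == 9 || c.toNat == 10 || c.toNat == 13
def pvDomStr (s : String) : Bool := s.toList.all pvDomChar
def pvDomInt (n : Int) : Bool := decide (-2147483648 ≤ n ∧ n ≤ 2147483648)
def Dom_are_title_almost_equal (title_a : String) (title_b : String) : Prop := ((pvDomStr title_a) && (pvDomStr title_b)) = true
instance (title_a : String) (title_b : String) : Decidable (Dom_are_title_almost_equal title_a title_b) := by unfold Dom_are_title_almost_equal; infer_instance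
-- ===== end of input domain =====

-- B replaces A's build-two-filtered-tuples-and-compare with a two-pointer scan that
-- skips invalid characters in place and exits early on the first mismatch (alternative decomposition).

-- ===== PORT A =====
-- A's `is_valid_char`: membership in the digit set or the lowercase-letter set,
-- ported as the equivalent range tests over those same character ranges.
def pvIsValidCharA (c : Char) : Bool :=
  ('0' ≤ c && c ≤ '9') || ('a' ≤ c && c ≤ 'z')

def are_title_almost_equal (title_a : String) (title_b : String) : Bool :=
  List.filter pvIsValidCharA (PySem.Chars.lower title_a.toList)
    == List.filter pvIsValidCharA (PySem.Chars.lower title_b.toList)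

-- ===== PORT B =====
def pvIsValidCharB (c : Char) : Bool :=
  ('0' ≤ c && c ≤ '9') || ('a' ≤ c && c ≤ 'z')

-- the inner `while` loops advancing an index past invalid characters
def pvSkipInvalid : List Char → List Char
  | [] => []
  | c :: cs => if pvIsValidCharB c then c :: cs else pvSkipInvalid cs

theorem pvSkipInvalid_length_le (xs : List Char) : (pvSkipInvalid xs).length ≤ xs.length := by
  induction xs with
  | nil => simp [pvSkipInvalid]
  | cons c cs ih =>
    simp only [pvSkipInvalid]
    split <;> simp <;> omega

-- the outer loop: skip invalid on both sides, then compare heads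
def pvScan (xs ys : List Char) : Bool :=
  match hx : pvSkipInvalid xs, hy : pvSkipInvalid ys with
  | [], [] => true
  | _ :: _, [] => false
  | [], _ :: _ => false
  | x :: xs', y :: ys' => x == y && pvScan xs' ys'
termination_by xs.length + ys.length
decreasing_by
  have h1 := pvSkipInvalid_length_le xs
  have h2 := pvSkipInvalid_length_le ys
  rw [hx] at h1; rw [hy] at h2
  simp at h1 h2; omega

def are_title_almost_equal_alt (title_a : String) (title_b : String) : Bool :=
  pvScan (PySem.Chars.lower title_a.toList) (PySem.Chars.lower title_b.toList)

-- ===== PRECONDITION & SPEC =====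
def Spec_are_title_almost_equal (title_a : String) (title_b : String) (out : Bool) : Prop := out = are_title_almost_equal_alt title_a title_b
instance (title_a : String) (title_b : String) (out : Bool) : Decidable (Spec_are_title_almost_equal title_a title_b out) := by unfold Spec_are_title_almost_equal; infer_instance

-- ===== CLAIM (what is proved, stated in full; the proofs are below) =====
def Claim_equal_are_title_almost_equal : Prop := ∀ (title_a : String) (title_b : String), Dom_are_title_almost_equal title_a title_b → Spec_are_title_almost_equal title_a title_b (are_title_almost_equal title_a title_b)

-- ===== LEMMAS AND PROOFS =====

theorem pvFilter_skipInvalid (xs : List Char) :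
    List.filter pvIsValidCharB (pvSkipInvalid xs) = List.filter pvIsValidCharB xs := by
  induction xs with
  | nil => rfl
  | cons c cs ih =>
    simp only [pvSkipInvalid]
    by_cases h : pvIsValidCharB c = true <;> simp [h, ih]

theorem pvSkipInvalid_head_valid (xs : List Char) (x : Char) (t : List Char)
    (h : pvSkipInvalid xs = x :: t) : pvIsValidCharB x = true := by
  induction xs with
  | nil => simp [pvSkipInvalid] at h
  | cons c cs ih =>
    simp only [pvSkipInvalid] at h
    split at h
    · cases h; assumption
    · exact ih h

theorem pvScan_eq_filter (xs ys : List Char) :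
    pvScan xs ys = (List.filter pvIsValidCharB xs == List.filter pvIsValidCharB ys) := by
  fun_induction pvScan xs ys with
  | case1 xs ys hx hy =>
    rw [← pvFilter_skipInvalid xs, ← pvFilter_skipInvalid ys, hx, hy]
    rfl
  | case2 xs ys x xs' hx hy =>
    rw [← pvFilter_skipInvalid xs, ← pvFilter_skipInvalid ys, hx, hy]
    simp [pvSkipInvalid_head_valid xs x xs' hx]
  | case3 xs ys y ys' hx hy =>
    rw [← pvFilter_skipInvalid xs, ← pvFilter_skipInvalid ys, hx, hy]
    simp [pvSkipInvalid_head_valid ys y ys' hy]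
  | case4 xs ys x xs' y ys' hx hy ih =>
    rw [← pvFilter_skipInvalid xs, ← pvFilter_skipInvalid ys, hx, hy]
    simp [pvSkipInvalid_head_valid xs x xs' hx, pvSkipInvalid_head_valid ys y ys' hy, ih]

-- ===== VERDICT (by name: the statement is the Claim_ definition above) =====
theorem are_title_almost_equal_spec : Claim_equal_are_title_almost_equal := by
  intro ta tb _
  unfold Spec_are_title_almost_equal are_title_almost_equal are_title_almost_equal_alt
  rw [pvScan_eq_filter]
  rfl
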